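-- pv_equiv track=rewrite | github.com/walkccc/LeetCode | solutions/1638. Count Substrings That Differ by One Character/1638.py | _count
-- ===== SOURCE A (Python) =====
-- def _count(s: str, t: str, i: int, j: int) -> int:
--   """Returns the number of substrings of s[i..n) and t[j:] that differ by one char."""
--   res = 0
--   # the number of substrings starting at s[i] and t[j] ending in the current
--   # index with zero different letter
--   dp0 = 0
--   # the number of substrings starting at s[i] and t[j] ending in the current
--   # index with one different letter
--   dp1 = 0
--
--   while i < len(s) and j < len(t):
--     if s[i] == t[j]:
--       dp0 += 1
--     else:
--       dp0, dp1 = 0, dp0 + 1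
--     res += dp1
--     i += 1
--     j += 1
--
--   return res
-- ===== SOURCE B (Python) =====
-- def _count(s: str, t: str, i: int, j: int) -> int:
--   """Returns the number of substrings of s[i..n) and t[j:] that differ by one char."""
--   eq = []
--   while i < len(s) and j < len(t):
--     eq.append(s[i] == t[j])
--     i += 1
--     j += 1
--   n = len(eq)
--   # right[k] = length of the run of equal positions starting at k
--   right = [0] * (n + 1)
--   for k in range(n - 1, -1, -1):
--     right[k] = right[k + 1] + 1 if eq[k] else 0
--   total = 0
--   left = 0
--   for k in range(n):
--     if eq[k]:
--       left += 1
--     else: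
--       total += (left + 1) * (right[k + 1] + 1)
--       left = 0
--   return total
-- ===== Notes on version B (the rewrite author's own statement) =====
-- stated objective: alternative
-- what changed: Replaces A's incremental dp0/dp1 recurrence with a three-pass scheme: build the diagonal match list, compute right run-lengths in a backward pass, then sum (leftRun+1)*(rightRun+1) over mismatch positions.
-- outside the precondition, e.g. on _count('ab', 'cd', -5, 0): A raises IndexError, B raises IndexError
import Mathlib
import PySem

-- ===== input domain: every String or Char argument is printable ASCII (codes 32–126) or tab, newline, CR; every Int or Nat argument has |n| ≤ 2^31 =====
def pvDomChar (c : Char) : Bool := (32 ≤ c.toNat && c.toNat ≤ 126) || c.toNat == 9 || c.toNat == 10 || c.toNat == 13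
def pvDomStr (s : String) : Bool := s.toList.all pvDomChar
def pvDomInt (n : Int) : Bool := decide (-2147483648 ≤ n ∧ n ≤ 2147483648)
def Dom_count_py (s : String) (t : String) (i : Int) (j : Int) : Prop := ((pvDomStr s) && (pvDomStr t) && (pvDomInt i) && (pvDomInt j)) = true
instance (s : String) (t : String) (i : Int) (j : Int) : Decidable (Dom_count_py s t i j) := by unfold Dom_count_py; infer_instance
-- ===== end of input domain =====

-- B replaces A's incremental dp0/dp1 recurrence by an explicit per-mismatch product
-- (left run + 1) * (right run + 1) computed from a match-list and a backward run-length pass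
-- (objective: alternative — same O(n) cost, a genuinely different counting decomposition).

-- ===== PORT A =====
-- A's while loop: state (res, dp0, dp1), indices advance together; on an index out of
-- range below -len Python raises IndexError (excluded by Pre_; the port returns res there).
def countLoopA (cs ct : List Char) (i j res dp0 dp1 : Int) : Int :=
  if _h : i < (cs.length : Int) ∧ j < (ct.length : Int) then
    match PySem.List.pyGet? cs i, PySem.List.pyGet? ct j with
    | some a, some b =>
        if a = b then countLoopA cs ct (i + 1) (j + 1) (res + dp1) (dp0 + 1) dp1
        else countLoopA cs ct (i + 1) (j + 1) (res + (dp0 + 1)) 0 (dp0 + 1)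
    | _, _ => res
  else res
termination_by ((cs.length : Int) - i).toNat
decreasing_by all_goals omega

def count_py (s : String) (t : String) (i : Int) (j : Int) : Int :=
  countLoopA s.toList t.toList i j 0 0 0

-- ===== PORT B =====
-- Source B's first while loop: the list of booleans s[i+k] == t[j+k] along the diagonal.
def buildEq (cs ct : List Char) (i j : Int) : List Bool :=
  if _h : i < (cs.length : Int) ∧ j < (ct.length : Int) then
    match PySem.List.pyGet? cs i, PySem.List.pyGet? ct j with
    | some a, some b => (a = b) :: buildEq cs ct (i + 1) (j + 1)
    | _, _ => []
  else []
termination_by ((cs.length : Int) - i).toNat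
decreasing_by all_goals omega

-- Source B's backward pass: right[k] = length of the run of True starting at k (length n+1, last 0).
def rightRuns : List Bool → List Int
  | [] => [0]
  | b :: bs =>
      let r := rightRuns bs
      (if b then r.headD 0 + 1 else 0) :: r

-- Source B's forward pass: walk eq with the suffix of right aligned one position ahead;
-- on a mismatch add (left+1)*(right[k+1]+1).
def sweep : List Bool → List Int → Int → Int → Int
  | [], _, _, total => total
  | b :: bs, rs, left, total =>
      if b then sweep bs rs.tail (left + 1) total
      else sweep bs rs.tail 0 (total + (left + 1) * (rs.tail.headD 0 + 1))

def count_py_alt (s : String) (t : String) (i : Int) (j : Int) : Int :=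
  let eq := buildEq s.toList t.toList i j
  sweep eq (rightRuns eq) 0 0

-- ===== PRECONDITION & SPEC =====
-- Pre_ excludes exactly the inputs where Python A raises IndexError (the loop is entered
-- with i < -len(s) or j < -len(t)); B's Python raises there too.
def Pre_count_py (s : String) (t : String) (i : Int) (j : Int) : Prop :=
  ¬ (i < (s.toList.length : Int) ∧ j < (t.toList.length : Int) ∧
      (i < -(s.toList.length : Int) ∨ j < -(t.toList.length : Int)))
instance (s : String) (t : String) (i : Int) (j : Int) : Decidable (Pre_count_py s t i j) := by
  unfold Pre_count_py; infer_instance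

def pvWitness_count_py : String × String × Int × Int := ("abcde", "bbcdf", 0, 0)

def Spec_count_py (s : String) (t : String) (i : Int) (j : Int) (out : Int) : Prop := out = count_py_alt s t i j
instance (s : String) (t : String) (i : Int) (j : Int) (out : Int) : Decidable (Spec_count_py s t i j out) := by unfold Spec_count_py; infer_instance

-- ===== CLAIM (what is proved, stated in full; the proofs are below) =====
def Claim_equal_count_py : Prop := ∀ (s : String) (t : String) (i : Int) (j : Int), Dom_count_py s t i j → Pre_count_py s t i j → Spec_count_py s t i j (count_py s t i j)

-- ===== LEMMAS AND PROOFS =====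

-- A's dp recurrence abstracted over the match list.
def listA : List Bool → Int → Int → Int → Int
  | [], res, _, _ => res
  | b :: bs, res, dp0, dp1 =>
      if b then listA bs (res + dp1) (dp0 + 1) dp1
      else listA bs (res + (dp0 + 1)) 0 (dp0 + 1)

-- length of the leading run of True
def leadTrue : List Bool → Int
  | [] => 0
  | true :: bs => leadTrue bs + 1
  | false :: _ => 0

theorem rightRuns_headD (bs : List Bool) : (rightRuns bs).headD 0 = leadTrue bs := by
  induction bs with
  | nil => simp [rightRuns, leadTrue]
  | cons b bs ih =>
    cases b
    · simp [rightRuns, leadTrue]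
    · simp only [rightRuns, List.headD_cons, if_true, leadTrue]
      rw [ih]

theorem listA_split (bs : List Bool) : ∀ res dp0 dp1 : Int,
    listA bs res dp0 dp1 = res + dp1 * leadTrue bs + listA bs 0 dp0 0 := by
  induction bs with
  | nil => intro res dp0 dp1; simp [listA, leadTrue]
  | cons b bs ih =>
    intro res dp0 dp1
    cases b
    · simp only [listA, leadTrue, if_false, Bool.false_eq_true]
      rw [ih (res + (dp0 + 1)) 0 (dp0 + 1), ih (0 + (dp0 + 1)) 0 (dp0 + 1)]
      ring
    · simp only [listA, leadTrue, if_true]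
      rw [ih (res + dp1) (dp0 + 1) dp1, ih (0 + 0) (dp0 + 1) 0]
      ring

theorem sweep_eq (bs : List Bool) : ∀ left total : Int,
    sweep bs (rightRuns bs) left total = total + listA bs 0 left 0 := by
  induction bs with
  | nil => intro left total; simp [sweep, listA]
  | cons b bs ih =>
    intro left total
    cases b
    · simp only [sweep, rightRuns, List.tail_cons, if_false, Bool.false_eq_true, listA]
      rw [ih 0 _, listA_split bs (0 + (left + 1)) 0 (left + 1), rightRuns_headD]
      ring
    · simp only [sweep, rightRuns, List.tail_cons, if_true, listA]
      rw [ih (left + 1) total]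
      simp

-- bridge: A's loop equals the dp recurrence over B's match list, whenever no IndexError occurs.
theorem bridge (n : Nat) : ∀ (cs ct : List Char) (i j res dp0 dp1 : Int),
    ((cs.length : Int) - i).toNat ≤ n →
    (i < (cs.length : Int) → j < (ct.length : Int) →
      -(cs.length : Int) ≤ i ∧ -(ct.length : Int) ≤ j) →
    countLoopA cs ct i j res dp0 dp1 = listA (buildEq cs ct i j) res dp0 dp1 := by
  induction n with
  | zero =>
    intro cs ct i j res dp0 dp1 hn _
    rw [countLoopA, buildEq]
    have : ¬ (i < (cs.length : Int) ∧ j < (ct.length : Int)) := by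
      intro ⟨h1, _⟩; omega
    simp [this, listA]
  | succ n ih =>
    intro cs ct i j res dp0 dp1 hn hpre
    rw [countLoopA, buildEq]
    by_cases hc : i < (cs.length : Int) ∧ j < (ct.length : Int)
    · have hi := hc.1
      have hj := hc.2
      obtain ⟨hi0, hj0⟩ := hpre hi hj
      have hs : ∃ a, PySem.List.pyGet? cs i = some a := by
        cases hget : PySem.List.pyGet? cs i with
        | some a => exact ⟨a, rfl⟩
        | none =>
          rw [PySem.List.pyGet?_eq_none_iff] at hget
          exact absurd (by constructor <;> simpa using by omega : PySem.Raise.InRange cs.length i) hget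
      have ht : ∃ b, PySem.List.pyGet? ct j = some b := by
        cases hget : PySem.List.pyGet? ct j with
        | some b => exact ⟨b, rfl⟩
        | none =>
          rw [PySem.List.pyGet?_eq_none_iff] at hget
          exact absurd (by constructor <;> simpa using by omega : PySem.Raise.InRange ct.length j) hget
      obtain ⟨a, ha⟩ := hs
      obtain ⟨b, hb⟩ := ht
      have hinv : (i + 1) < (cs.length : Int) → (j + 1) < (ct.length : Int) →
          -(cs.length : Int) ≤ i + 1 ∧ -(ct.length : Int) ≤ j + 1 := by
        intro _ _; omega
      simp only [dif_pos hc, ha, hb]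
      by_cases hab : a = b
      · simp only [listA, hab, decide_true, if_true]
        exact ih cs ct (i + 1) (j + 1) (res + dp1) (dp0 + 1) dp1 (by omega) hinv
      · simp only [listA, hab, decide_false, Bool.false_eq_true, if_false]
        exact ih cs ct (i + 1) (j + 1) (res + (dp0 + 1)) 0 (dp0 + 1) (by omega) hinv
    · simp [dif_neg hc, listA]

-- ===== VERDICT (by name: the statement is the Claim_ definition above) =====
theorem count_py_spec : Claim_equal_count_py := by
  intro s t i j _ hpre
  unfold Spec_count_py count_py count_py_alt
  unfold Pre_count_py at hpre
  push Not at hpre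
  rw [bridge (((s.toList.length : Int) - i).toNat) s.toList t.toList i j 0 0 0 le_rfl
      (fun hi hj => by rcases hpre hi hj with ⟨h1, h2⟩; omega)]
  rw [sweep_eq]
  simp
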